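-- pv_equiv track=rewrite | github.com/pypi-data/pypi-mirror-31 | packages/wyqpy/wyqpy-0.1.1.3-py2.py3-none-any.whl/wyqpy/math/prime.py | getAllOdds
-- ===== SOURCE A (Python) =====
-- def isOdd(n):
--     """
--     @param n: 大于等于0
--     @return: 判断n是否是奇数
--     """
--     if n % 2 == 1:
--         return True
--     return False
--
-- def getAllOdds(minn, maxn):
--     """
--     @param minn: 大于等于0
--     @param maxn: 大于等于minn
--     @return: 获取所有奇数
--     """
--     result = [];
--     if minn <= 0:
--         minn = 0
--     if minn > maxn:
--         return result;
--     for i in range(minn, maxn + 1):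
--         if (isOdd(i)):
--             result.append(i)
--     return result
-- ===== SOURCE B (Python) =====
-- def getAllOdds(minn, maxn):
--     if minn <= 0:
--         minn = 0
--     if minn > maxn:
--         return []
--     start = minn if minn % 2 == 1 else minn + 1
--     return list(range(start, maxn + 1, 2))
-- ===== Notes on version B (the rewrite author's own statement) =====
-- stated objective: idiomatic
-- what changed: Instead of scanning every integer in [minn, maxn] and filtering with an isOdd modulus test, B computes the first odd value and steps directly over the odd numbers with range(start, maxn+1, 2).
import Mathlib
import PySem

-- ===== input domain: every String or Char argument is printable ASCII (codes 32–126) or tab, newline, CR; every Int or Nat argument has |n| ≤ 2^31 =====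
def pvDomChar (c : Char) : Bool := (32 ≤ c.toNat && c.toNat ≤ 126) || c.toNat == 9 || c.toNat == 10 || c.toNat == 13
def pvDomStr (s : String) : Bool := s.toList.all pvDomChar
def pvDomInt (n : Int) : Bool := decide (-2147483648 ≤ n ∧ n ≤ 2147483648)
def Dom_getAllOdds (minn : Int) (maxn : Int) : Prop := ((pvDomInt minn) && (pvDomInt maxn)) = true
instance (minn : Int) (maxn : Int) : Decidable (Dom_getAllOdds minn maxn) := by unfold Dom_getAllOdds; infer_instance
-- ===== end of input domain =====

-- B replaces A's scan-and-filter over every integer by stepping directly over the odd numbers (range with step 2); same return value everywhere.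


-- ===== PORT A =====
def isOdd (n : Int) : Bool :=
  if PySem.Int.mod n 2 = 1 then true else false

def getAllOdds (minn : Int) (maxn : Int) : List Int :=
  let minn' := if minn ≤ 0 then 0 else minn
  if minn' > maxn then []
  else (PySem.List.pyRange minn' (maxn + 1) 1).foldl
    (fun result i => if isOdd i then result ++ [i] else result) []

-- ===== PORT B =====
def getAllOdds_alt (minn : Int) (maxn : Int) : List Int :=
  let minn' := if minn ≤ 0 then 0 else minn
  if minn' > maxn then []
  else
    let start := if PySem.Int.mod minn' 2 = 1 then minn' else minn' + 1
    PySem.List.pyRange start (maxn + 1) 2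

-- ===== PRECONDITION & SPEC =====
def Spec_getAllOdds (minn : Int) (maxn : Int) (out : List Int) : Prop := out = getAllOdds_alt minn maxn
instance (minn : Int) (maxn : Int) (out : List Int) : Decidable (Spec_getAllOdds minn maxn out) := by unfold Spec_getAllOdds; infer_instance

-- ===== CLAIM (what is proved, stated in full; the proofs are below) =====
def Claim_equal_getAllOdds : Prop := ∀ (minn : Int) (maxn : Int), Dom_getAllOdds minn maxn → Spec_getAllOdds minn maxn (getAllOdds minn maxn)

-- ===== LEMMAS AND PROOFS =====

lemma isOdd_iff (x : Int) : isOdd x = true ↔ x % 2 = 1 := by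
  simp [isOdd]

lemma eq_of_mem_iff_pairwise_lt (l1 l2 : List Int)
    (h1 : l1.Pairwise (· < ·)) (h2 : l2.Pairwise (· < ·))
    (hm : ∀ x, x ∈ l1 ↔ x ∈ l2) : l1 = l2 := by
  have hp : l1.Perm l2 :=
    (List.perm_ext_iff_of_nodup
      (h1.imp fun h => ne_of_lt h) (h2.imp fun h => ne_of_lt h)).2 hm
  exact hp.eq_of_pairwise (fun a b ha hb h h' => absurd h' (not_lt_of_gt h)) h1 h2

lemma pairwise_lt_pyRange_two (c b : Int) :
    (PySem.List.pyRange c b 2).Pairwise (· < ·) := by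
  rw [PySem.List.pyRange_of_pos c b (by norm_num : (0:Int) < 2)]
  exact List.Pairwise.map _ (fun i j h => by omega) List.pairwise_lt_range

lemma filter_odd_eq_step2 (a b : Int) :
    (PySem.List.pyRange a b 1).filter isOdd =
      PySem.List.pyRange (if PySem.Int.mod a 2 = 1 then a else a + 1) b 2 := by
  apply eq_of_mem_iff_pairwise_lt
  · exact PySem.List.pairwise_lt_pyRange_one a b |>.filter _
  · exact pairwise_lt_pyRange_two _ b
  · intro x
    rw [List.mem_filter, PySem.List.mem_pyRange_one, isOdd_iff,
      PySem.List.mem_pyRange_iff_of_pos (by norm_num : (0:Int) < 2)]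
    rw [PySem.Int.mod_eq_emod_of_pos (a := a) (by norm_num : (0:Int) < 2)]
    split_ifs with h <;> omega

-- ===== VERDICT (by name: the statement is the Claim_ definition above) =====
theorem getAllOdds_spec : Claim_equal_getAllOdds := by
  intro minn maxn _
  unfold Spec_getAllOdds getAllOdds getAllOdds_alt
  dsimp only
  by_cases h : (if minn ≤ 0 then (0:Int) else minn) > maxn
  · rw [if_pos h, if_pos h]
  · rw [if_neg h, if_neg h,
      PySem.List.foldl_append_if_eq_filter isOdd _ [], List.nil_append,
      filter_odd_eq_step2]
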